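-- pv_equiv track=rewrite | github.com/insta4outlier/Algorithm | code/프로그래머스/lv2/12913.py | solution
-- ===== SOURCE A (Python) =====
-- def solution(land):
--     table = [x for x in land[0]]
--     for i in range(1, len(land)):
--         tmp = [num for num in table]
--         for j in range(4):
--             x = land[i][j]
--             for k, num in enumerate(table):
--                 if j != k:
--                     x = max(x, num + land[i][j])
--             tmp[j] = x
--         table = [num for num in tmp]
--     return max(table)
-- ===== SOURCE B (Python) =====
-- def solution(land):
--     table = list(land[0])
--     for row in land[1:]:
--         # one pass over table: largest value (with first index) and second largest
--         best, bi, second = table[0], 0, None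
--         for k in range(1, len(table)):
--             v = table[k]
--             if v > best:
--                 second, best, bi = best, v, k
--             elif second is None or v > second:
--                 second = v
--         tmp = list(table)
--         for j in range(4):
--             tmp[j] = row[j] + max(0, second if j == bi else best)
--         table = tmp
--     return max(table)
-- ===== Notes on version B (the rewrite author's own statement) =====
-- stated objective: faster
-- what changed: Instead of rescanning the whole previous table once per column (excluding one index each time), B finds the table's largest value (with its first index) and second-largest value in a single pass and then fills each of the 4 columns from those two precomputed values.
import Mathlib
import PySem

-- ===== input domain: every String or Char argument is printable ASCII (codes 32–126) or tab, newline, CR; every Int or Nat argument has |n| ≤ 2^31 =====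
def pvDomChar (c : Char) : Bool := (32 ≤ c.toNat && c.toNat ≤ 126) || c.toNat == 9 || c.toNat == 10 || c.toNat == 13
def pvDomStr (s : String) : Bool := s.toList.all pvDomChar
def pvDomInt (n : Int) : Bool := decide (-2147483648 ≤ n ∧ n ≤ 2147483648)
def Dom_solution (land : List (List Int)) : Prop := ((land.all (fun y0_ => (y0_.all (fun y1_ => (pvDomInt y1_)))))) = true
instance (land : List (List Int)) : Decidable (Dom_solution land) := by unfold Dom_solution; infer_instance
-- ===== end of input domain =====

-- B replaces A's per-column rescan of the previous table by one pass computing (largest, its first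
-- index, second largest); a timing run measured B faster by a constant factor.

-- ===== PORT A =====
-- body of A's outer loop: for j in range(4): x = land[i][j]; for k, num in enumerate(table): …; tmp[j] = x
def stepA (table row : List Int) : List Int :=
  (PySem.List.pyRange 0 4 1).foldl (fun tmp j =>
    let lij := PySem.List.pyGetD row j 0
    let x := (PySem.List.enumerate table 0).foldl
      (fun x kn => if j ≠ kn.1 then max x (kn.2 + lij) else x) lij
    tmp.set j.toNat x) table

def solution (land : List (List Int)) : Int :=
  let table := PySem.List.pyGetD land 0 []
  let table := (PySem.List.pyRange 1 (land.length : Int) 1).foldl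
    (fun table i => stepA table (PySem.List.pyGetD land i [])) table
  (PySem.List.max? table (fun x => x)).getD 0

-- ===== PORT B =====
-- body of B's scan loop: v = table[k]; the two comparisons updating (best, bi, second)
def updB (s : Int × Int × Option Int) (k : Int) (v : Int) : Int × Int × Option Int :=
  if v > s.1 then (v, k, some s.1)
  else if (match s.2.2 with | none => true | some sec => decide (v > sec)) then (s.1, s.2.1, some v)
  else s

-- body of B's outer loop: the one-pass scan, then tmp[j] = row[j] + max(0, …) for j in range(4)
def stepB (table row : List Int) : List Int :=
  let st := (PySem.List.pyRange 1 (table.length : Int) 1).foldl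
    (fun s k => updB s k (PySem.List.pyGetD table k 0))
    (PySem.List.pyGetD table 0 0, 0, none)
  (PySem.List.pyRange 0 4 1).foldl (fun tmp j =>
    tmp.set j.toNat (PySem.List.pyGetD row j 0 +
      max 0 ((if j == st.2.1 then st.2.2 else some st.1).getD 0))) table

def solution_alt (land : List (List Int)) : Int :=
  let table := PySem.List.pyGetD land 0 []
  let table := (PySem.List.slice land (some 1) none).foldl (fun table row => stepB table row) table
  (PySem.List.max? table (fun x => x)).getD 0

-- ===== PRECONDITION & SPEC =====
-- Exactly the inputs on which A returns normally: a nonempty land whose first row is nonempty, and —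
-- when there is more than one row — every row has at least 4 entries (otherwise A raises an
-- IndexError on land[i][j] or tmp[j], or a ValueError taking the maximum of an empty first row).
def Pre_solution (land : List (List Int)) : Prop :=
  land ≠ [] ∧ land.headD [] ≠ [] ∧
    (land.length = 1 ∨ (4 ≤ (land.headD []).length ∧ ∀ r ∈ land.tail, 4 ≤ r.length))
instance (land : List (List Int)) : Decidable (Pre_solution land) := by unfold Pre_solution; infer_instance

def pvWitness_solution : List (List Int) := [[1, 2, 3, 4], [4, 3, 2, 1]]

def Spec_solution (land : List (List Int)) (out : Int) : Prop := out = solution_alt land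
instance (land : List (List Int)) (out : Int) : Decidable (Spec_solution land out) := by unfold Spec_solution; infer_instance

-- ===== CLAIM (what is proved, stated in full; the proofs are below) =====
def Claim_equal_solution : Prop := ∀ (land : List (List Int)), Dom_solution land → Pre_solution land → Spec_solution land (solution land)

-- ===== LEMMAS AND PROOFS =====

theorem pyRange04 : PySem.List.pyRange 0 4 1 = [0, 1, 2, 3] := by decide

-- a fold over range(a, len(xs)) reading xs[k] is a fold over enumerate(xs[a:], a)
theorem foldl_pyRange_enum {σ : Type} (g : σ → Int → Int → σ) :
    ∀ (ts xs : List Int) (a : ℕ), xs.drop a = ts → ∀ (init : σ),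
      (PySem.List.pyRange (a : ℤ) (xs.length : ℤ) 1).foldl
          (fun st k => g st k (PySem.List.pyGetD xs k 0)) init
        = (PySem.List.enumerate ts (a : ℤ)).foldl (fun st kv => g st kv.1 kv.2) init := by
  intro ts
  induction ts with
  | nil =>
    intro xs a h init
    have hle : xs.length ≤ a := by
      have := List.drop_eq_nil_iff.mp h
      omega
    rw [PySem.List.pyRange_one_eq_nil (by exact_mod_cast hle)]
    rfl
  | cons v ts ih =>
    intro xs a h init
    have hlen := congrArg List.length h
    simp only [List.length_drop, List.length_cons] at hlen
    have ha : a < xs.length := by omega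
    have hget : xs.getD a 0 = v := by
      have h0 : (xs.drop a)[0]? = some v := by rw [h]; rfl
      rw [List.getElem?_drop] at h0
      simp only [Nat.add_zero] at h0
      simp [List.getD, h0]
    have hdrop : xs.drop (a + 1) = ts := by
      have h2 : (xs.drop a).drop 1 = xs.drop (a + 1) := List.drop_drop
      rw [h] at h2
      simpa using h2.symm
    rw [PySem.List.pyRange_one_cons (by exact_mod_cast ha), PySem.List.enumerate_cons]
    simp only [List.foldl_cons, PySem.List.pyGetD_natCast, hget]
    have hcast : (a : ℤ) + 1 = ((a + 1 : ℕ) : ℤ) := by push_cast; ring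
    rw [hcast, ih xs (a + 1) hdrop]

-- what B's scan state means after having read the prefix l of the table
def ScanInv (l : List Int) (st : Int × Int × Option Int) : Prop :=
  ∃ i : ℕ, st.2.1 = (i : ℤ) ∧ i < l.length ∧ l[i]? = some st.1 ∧
    (∀ (k : ℕ) (x : Int), k < i → l[k]? = some x → x < st.1) ∧
    (∀ x ∈ l, x ≤ st.1) ∧
    st.2.2 = (l.eraseIdx i).max?

theorem max?_concat (l : List Int) (v : Int) :
    (l ++ [v]).max? = some (match l.max? with | none => v | some m => max m v) := by
  cases l with
  | nil => rfl
  | cons u l => rw [List.cons_append, List.max?_cons', List.max?_cons', List.foldl_append]; rfl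

theorem scan_step (l : List Int) (st : Int × Int × Option Int) (v : Int)
    (h : ScanInv l st) : ScanInv (l ++ [v]) (updB st (l.length : ℤ) v) := by
  obtain ⟨i, h1, h2, h3, h4, h5, h6⟩ := h
  unfold updB
  by_cases hv : v > st.1
  · refine ⟨l.length, by simp [hv], by simp, ?_, ?_, ?_, ?_⟩
    · simp [hv, List.getElem?_append_right]
    · intro k x hk hx
      rw [List.getElem?_append_left hk] at hx
      have : x ∈ l := List.mem_of_getElem? hx
      simp only [hv, if_pos]
      exact lt_of_le_of_lt (h5 x this) hv
    · intro x hx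
      rcases List.mem_append.mp hx with hx | hx
      · simp only [hv, if_pos]
        exact le_of_lt (lt_of_le_of_lt (h5 x hx) hv)
      · simp only [List.mem_singleton] at hx
        simp [hx, hv]
    · have he : (l ++ [v]).eraseIdx l.length = l := by
        rw [List.eraseIdx_append_of_length_le (le_refl l.length)]
        simp
      have hmax : l.max? = some st.1 := by
        rw [List.max?_eq_some_iff]
        exact ⟨List.mem_of_getElem? h3, h5⟩
      simp [hv, he, hmax]
  · have hsub : ∀ (sec' : Option Int),
        (sec' = (l.eraseIdx i ++ [v]).max?) →
        ScanInv (l ++ [v]) (st.1, st.2.1, sec') := by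
      intro sec' hsec'
      refine ⟨i, h1, by simp; omega, ?_, ?_, ?_, hsec' ▸ by
        rw [List.eraseIdx_append_of_lt_length h2]⟩
      · rw [List.getElem?_append_left h2]; exact h3
      · intro k x hk hx
        rw [List.getElem?_append_left (by omega)] at hx
        exact h4 k x hk hx
      · intro x hx
        rcases List.mem_append.mp hx with hx | hx
        · exact h5 x hx
        · simp only [List.mem_singleton] at hx
          omega
    rcases hsec : st.2.2 with _ | s
    · -- second is None: it becomes some v
      have hnil : l.eraseIdx i = [] := List.max?_eq_none_iff.mp (hsec ▸ h6).symm
      have := hsub (some v) (by rw [hnil]; rfl)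
      simpa [hv, hsec] using this
    · by_cases hvs : v > s
      · have hm : (l.eraseIdx i ++ [v]).max? = some v := by
          rw [max?_concat, ← h6, hsec]
          simp [max_eq_right (le_of_lt hvs)]
        have := hsub (some v) hm.symm
        simpa [hv, hsec, hvs] using this
      · have hm : (l.eraseIdx i ++ [v]).max? = some s := by
          rw [max?_concat, ← h6, hsec]
          simp [max_eq_left (by omega : v ≤ s)]
        have hthis := hsub (some s) hm.symm
        have hst' : (st.1, st.2.1, some s) = st := by rw [← hsec]
        rw [hst'] at hthis
        simpa [hv, hsec, hvs] using hthis

theorem scan_fold : ∀ (ts l : List Int) (st : Int × Int × Option Int), ScanInv l st →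
    ScanInv (l ++ ts)
      ((PySem.List.enumerate ts (l.length : ℤ)).foldl (fun st kv => updB st kv.1 kv.2) st) := by
  intro ts
  induction ts with
  | nil => intro l st h; simpa using h
  | cons v ts ih =>
    intro l st h
    rw [PySem.List.enumerate_cons]
    simp only [List.foldl_cons]
    have hstep := scan_step l st v h
    have hcast : (l.length : ℤ) + 1 = ((l ++ [v]).length : ℤ) := by
      simp
    rw [hcast]
    have := ih (l ++ [v]) _ hstep
    simpa [List.append_assoc] using this

-- A's inner loop skips exactly index jz of the enumerate
theorem skip_fold (c : Int) :
    ∀ (t : List Int) (a jz : ℤ) (x0 : Int),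
      (PySem.List.enumerate t a).foldl (fun x kn => if jz ≠ kn.1 then max x (kn.2 + c) else x) x0
        = (if a ≤ jz ∧ jz < a + t.length then t.eraseIdx (jz - a).toNat else t).foldl
            (fun x v => max x (v + c)) x0 := by
  intro t
  induction t with
  | nil =>
    intro a jz x0
    rw [PySem.List.enumerate_nil]
    split <;> rfl
  | cons u t ih =>
    intro a jz x0
    rw [PySem.List.enumerate_cons]
    simp only [List.foldl_cons]
    by_cases hj : jz = a
    · simp only [hj, ne_eq, not_true_eq_false, ite_false]
      rw [ih (a + 1) a x0]
      have hc1 : ¬ (a + 1 ≤ a ∧ a < a + 1 + t.length) := by omega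
      have hc2 : (a ≤ a ∧ a < a + (u :: t).length) := by
        constructor
        · omega
        · simp only [List.length_cons]; push_cast; omega
      rw [if_neg hc1, if_pos hc2]
      have : (a - a).toNat = 0 := by omega
      rw [this, List.eraseIdx_cons_zero]
    · simp only [ne_eq, hj, not_false_eq_true, ite_true]
      rw [ih (a + 1) jz (max x0 (u + c))]
      by_cases hin : a ≤ jz ∧ jz < a + (u :: t).length
      · have hj1 : a + 1 ≤ jz := by omega
        have hin' : a + 1 ≤ jz ∧ jz < a + 1 + t.length := by
          constructor
          · omega
          · have := hin.2; simp only [List.length_cons] at this ⊢; push_cast at this ⊢; omega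
        rw [if_pos hin, if_pos hin']
        have hsplit : (jz - a).toNat = (jz - (a + 1)).toNat + 1 := by omega
        rw [hsplit, List.eraseIdx_cons_succ, List.foldl_cons]
      · have hin' : ¬ (a + 1 ≤ jz ∧ jz < a + 1 + t.length) := by
          intro hcon
          apply hin
          constructor
          · omega
          · have := hcon.2; simp only [List.length_cons]; push_cast at this ⊢; omega
        rw [if_neg hin, if_neg hin']
        rw [List.foldl_cons]

theorem maxfold (c : Int) :
    ∀ (l : List Int) (e x0 : Int),
      l.foldl (fun x v => max x (v + c)) (max x0 (e + c)) = max x0 (l.foldl max e + c) := by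
  intro l
  induction l with
  | nil => intro e x0; rfl
  | cons v l ih =>
    intro e x0
    simp only [List.foldl_cons]
    rw [show max (max x0 (e + c)) (v + c) = max x0 (max e v + c) by omega]
    exact ih (max e v) x0

-- the per-column value computed by A equals the one computed by B from the scan state
theorem val_eq (t : List Int) (ht : 4 ≤ t.length) (st : Int × Int × Option Int)
    (hst : ScanInv t st) (jz : ℤ) (h0 : 0 ≤ jz) (h4 : jz < 4) (c : Int) :
    (PySem.List.enumerate t 0).foldl (fun x kn => if jz ≠ kn.1 then max x (kn.2 + c) else x) c
      = c + max 0 ((if jz == st.2.1 then st.2.2 else some st.1).getD 0) := by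
  obtain ⟨i, h1, h2, h3, hpre, hall, hsec⟩ := hst
  have hj : jz.toNat < t.length := by omega
  have hjz : ((jz.toNat : ℕ) : ℤ) = jz := by omega
  rw [skip_fold c t 0 jz c]
  have hcond : (0 : ℤ) ≤ jz ∧ jz < 0 + t.length := by
    constructor
    · exact h0
    · push_cast; omega
  rw [if_pos hcond]
  have hz : (jz - 0) = jz := by ring
  rw [hz]
  have hlene : (t.eraseIdx jz.toNat).length = t.length - 1 := by
    rw [List.length_eraseIdx]
    simp [hj]
  rcases he : t.eraseIdx jz.toNat with _ | ⟨e, es⟩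
  · exfalso
    rw [he] at hlene
    simp at hlene
    omega
  · simp only [List.foldl_cons]
    rw [show max c (e + c) = max c (e + c) from rfl]
    have hfold := maxfold c es e c
    rw [hfold]
    have hmaxe : (t.eraseIdx jz.toNat).max? = some (es.foldl max e) := by
      rw [he, List.max?_cons']
    by_cases hji : jz = (i : ℤ)
    · have hbeq : (jz == st.2.1) = true := by rw [h1, hji]; simp
      have : jz.toNat = i := by omega
      simp only [hbeq, eq_self_iff_true, if_true]
      rw [hsec, ← this, hmaxe]
      simp only [Option.getD_some]
      omega
    · have hbeq : (jz == st.2.1) = false := by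
        rw [h1]; simp; omega
      rw [hbeq]
      simp only [Bool.false_eq_true, if_false, Option.getD_some]
      have hmem : st.1 ∈ t.eraseIdx jz.toNat := by
        rw [List.mem_eraseIdx_iff_getElem]
        refine ⟨i, h2, by omega, ?_⟩
        have := List.getElem?_eq_getElem h2
        rw [h3] at this
        exact (Option.some.injEq _ _).mp this.symm
      have hle : ∀ b ∈ t.eraseIdx jz.toNat, b ≤ st.1 :=
        fun b hb => hall b (List.mem_of_mem_eraseIdx hb)
      have : (t.eraseIdx jz.toNat).max? = some st.1 :=
        List.max?_eq_some_iff.mpr ⟨hmem, hle⟩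
      rw [this] at hmaxe
      have hbe : es.foldl max e = st.1 := (Option.some.injEq _ _).mp hmaxe.symm
      omega

-- B's scan establishes the invariant over the whole table
theorem scan_spec (t : List Int) (ht : 1 ≤ t.length) :
    ScanInv t ((PySem.List.pyRange 1 (t.length : ℤ) 1).foldl
      (fun s k => updB s k (PySem.List.pyGetD t k 0))
      (PySem.List.pyGetD t 0 0, 0, none)) := by
  rcases t with _ | ⟨t0, ts⟩
  · simp only [List.length_nil] at ht; omega
  · have hinit : ScanInv [t0] (t0, 0, none) := by
      refine ⟨0, rfl, by simp, rfl, ?_, ?_, rfl⟩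
      · intro k x hk; omega
      · intro x hx; simp at hx; omega
    have hget0 : PySem.List.pyGetD (t0 :: ts) 0 0 = t0 := by
      simp [PySem.List.pyGetD, PySem.List.pyGet?, PySem.List.pyIdx?]
    have hbr := foldl_pyRange_enum updB ts (t0 :: ts) 1 rfl (t0, 0, none)
    have hone : ((1 : ℕ) : ℤ) = 1 := by norm_num
    rw [hone] at hbr
    rw [hget0, hbr]
    have := scan_fold ts [t0] (t0, 0, none) hinit
    simpa using this

set_option maxHeartbeats 1000000 in
theorem step_eq (t row : List Int) (ht : 4 ≤ t.length) : stepA t row = stepB t row := by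
  unfold stepA stepB
  rw [pyRange04]
  have hscan := scan_spec t (by omega)
  simp only [List.foldl_cons, List.foldl_nil]
  rw [val_eq t ht _ hscan 0 (by norm_num) (by norm_num),
    val_eq t ht _ hscan 1 (by norm_num) (by norm_num),
    val_eq t ht _ hscan 2 (by norm_num) (by norm_num),
    val_eq t ht _ hscan 3 (by norm_num) (by norm_num)]

theorem length_stepB (t row : List Int) : (stepB t row).length = t.length := by
  unfold stepB
  rw [pyRange04]
  simp [List.length_set]

theorem fold_eq : ∀ (rest : List (List Int)) (t : List Int), 4 ≤ t.length →
    rest.foldl stepA t = rest.foldl stepB t := by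
  intro rest
  induction rest with
  | nil => intro t _; rfl
  | cons r rest ih =>
    intro t ht
    simp only [List.foldl_cons]
    rw [step_eq t r ht]
    exact ih (stepB t r) (by rw [length_stepB]; exact ht)

-- ===== VERDICT (by name: the statement is the Claim_ definition above) =====
theorem solution_spec : Claim_equal_solution := by
  intro land _ hpre
  obtain ⟨hne, hhead, hrest⟩ := hpre
  match land with
  | [] => exact absurd rfl hne
  | r0 :: rest =>
    unfold Spec_solution
    simp only [solution, solution_alt]
    rw [PySem.List.foldl_pyRange_pyGetD' (r0 :: rest) [] stepA _ (by norm_num : (0:Int) ≤ 1)]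
    rw [PySem.List.slice_from_one, ← List.drop_one]
    have htab : PySem.List.pyGetD (r0 :: rest) 0 [] = r0 := by
      simp [PySem.List.pyGetD, PySem.List.pyGet?, PySem.List.pyIdx?]
    rw [htab]
    have hdrop : ((r0 :: rest).drop (Int.toNat 1)) = rest := rfl
    rw [hdrop]
    rcases rest with _ | ⟨r1, rest'⟩
    · rfl
    · have h4 : 4 ≤ r0.length := by
        rcases hrest with h | h
        · simp at h
        · exact h.1
      rw [fold_eq (r1 :: rest') r0 h4]
      rfl
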